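-- pv_equiv track=rewrite | github.com/Opensourcecontri/Hacktoberfest-2021 | python/Maximum Nesting Depth of Two Valid Parentheses Strings.py | maxDepthAfterSplit
-- ===== SOURCE A (Python) =====
-- from typing import List
--
-- def maxDepthAfterSplit(seq: str) -> List[int]:
--     A,B = 0,0
--     answer = []
--     for s in seq:
--         if s == '(':
--             if B < A:
--                 B += 1
--                 answer.append(1)
--             else:
--                 A += 1
--                 answer.append(0)
--         else:
--             if B < A:
--                 A -= 1
--                 answer.append(0)
--             else:
--                 B -= 1
--                 answer.append(1)
--     return answer
-- ===== SOURCE B (Python) =====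
-- from typing import List
--
-- def maxDepthAfterSplit(seq: str) -> List[int]:
--     d = 0
--     answer = []
--     for s in seq:
--         if s == '(':
--             answer.append(d % 2)
--             d += 1
--         else:
--             d -= 1
--             answer.append(d % 2)
--     return answer
-- ===== Notes on version B (the rewrite author's own statement) =====
-- stated objective: simpler
-- what changed: Replaced A's two balancing counters (A, B with B<A comparisons in every branch) by a single running depth counter whose parity d % 2 directly gives the group label.
import Mathlib
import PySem

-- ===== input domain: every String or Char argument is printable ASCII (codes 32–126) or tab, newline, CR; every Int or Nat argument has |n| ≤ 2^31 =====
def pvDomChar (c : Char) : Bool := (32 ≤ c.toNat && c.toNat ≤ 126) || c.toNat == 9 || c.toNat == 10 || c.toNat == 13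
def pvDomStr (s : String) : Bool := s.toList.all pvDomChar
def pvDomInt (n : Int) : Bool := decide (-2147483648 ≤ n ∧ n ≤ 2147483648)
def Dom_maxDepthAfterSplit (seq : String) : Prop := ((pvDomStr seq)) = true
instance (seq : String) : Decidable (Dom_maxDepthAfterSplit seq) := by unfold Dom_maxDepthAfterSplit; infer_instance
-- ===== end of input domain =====

-- B replaces A's two balancing counters by a single depth counter with parity assignment (simpler, same cost).


-- ===== PORT A =====
def maxDepthAfterSplitStep (st : Int × Int × List Int) (s : Char) : Int × Int × List Int :=
  if s = '(' then
    if st.2.1 < st.1 then (st.1, st.2.1 + 1, st.2.2 ++ [(1 : Int)])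
    else (st.1 + 1, st.2.1, st.2.2 ++ [(0 : Int)])
  else
    if st.2.1 < st.1 then (st.1 - 1, st.2.1, st.2.2 ++ [(0 : Int)])
    else (st.1, st.2.1 - 1, st.2.2 ++ [(1 : Int)])

def maxDepthAfterSplit (seq : String) : List Int :=
  (seq.toList.foldl maxDepthAfterSplitStep (0, 0, [])).2.2

-- ===== PORT B =====
def maxDepthAfterSplitAltStep (st : Int × List Int) (s : Char) : Int × List Int :=
  if s = '(' then (st.1 + 1, st.2 ++ [PySem.Int.mod st.1 2])
  else (st.1 - 1, st.2 ++ [PySem.Int.mod (st.1 - 1) 2])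

def maxDepthAfterSplit_alt (seq : String) : List Int :=
  (seq.toList.foldl maxDepthAfterSplitAltStep (0, [])).2

-- ===== PRECONDITION & SPEC =====
def Spec_maxDepthAfterSplit (seq : String) (out : List Int) : Prop := out = maxDepthAfterSplit_alt seq
instance (seq : String) (out : List Int) : Decidable (Spec_maxDepthAfterSplit seq out) := by unfold Spec_maxDepthAfterSplit; infer_instance

-- ===== CLAIM (what is proved, stated in full; the proofs are below) =====
def Claim_equal_maxDepthAfterSplit : Prop := ∀ (seq : String), Dom_maxDepthAfterSplit seq → Spec_maxDepthAfterSplit seq (maxDepthAfterSplit seq)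

-- ===== LEMMAS AND PROOFS =====

-- Loop invariant: A's counters satisfy A = B or A = B + 1, B's depth is A + B,
-- and then each step appends the same digit on both sides.
theorem maxDepthAfterSplit_loop (l : List Char) (a b : Int) (ans : List Int)
    (h : a = b ∨ a = b + 1) :
    (l.foldl maxDepthAfterSplitStep (a, b, ans)).2.2
      = (l.foldl maxDepthAfterSplitAltStep (a + b, ans)).2 := by
  induction l generalizing a b ans with
  | nil => simp
  | cons c t ih =>
    have hm : ∀ x : Int, PySem.Int.mod x 2 = x % 2 :=
      fun x => PySem.Int.mod_eq_emod_of_pos (by norm_num)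
    simp only [List.foldl_cons, maxDepthAfterSplitStep, maxDepthAfterSplitAltStep, hm]
    rcases h with h | h <;> subst h <;> by_cases hc : c = '(' <;>
      simp only [hc, if_true, if_false]
    -- a = b, next char '(' : A appends 0, B appends (b+b) % 2 = 0
    · rw [if_neg (lt_irrefl a),
          show ((a + a) % 2 : Int) = 0 from by omega,
          show (a + a + (1 : Int)) = (a + 1) + a from by ring]
      exact ih (a + 1) a _ (Or.inr rfl)
    -- a = b, next char not '(' : A appends 1, B appends (b+b-1) % 2 = 1
    · rw [if_neg (lt_irrefl a),
          show ((a + a - 1) % 2 : Int) = 1 from by omega,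
          show (a + a - (1 : Int)) = a + (a - 1) from by ring]
      exact ih a (a - 1) _ (Or.inr (by ring))
    -- a = b + 1, next char '(' : A appends 1, B appends (2b+1) % 2 = 1
    · rw [if_pos (by omega : b < b + 1),
          show ((b + 1 + b) % 2 : Int) = 1 from by omega,
          show (b + 1 + b + (1 : Int)) = (b + 1) + (b + 1) from by ring]
      exact ih (b + 1) (b + 1) _ (Or.inl rfl)
    -- a = b + 1, next char not '(' : A appends 0, B appends (2b) % 2 = 0
    · rw [if_pos (by omega : b < b + 1),
          show ((b + 1 + b - 1) % 2 : Int) = 0 from by omega,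
          show (b + 1 + b - (1 : Int)) = b + b from by ring,
          show (b + (1 : Int) - 1) = b from by ring]
      exact ih b b _ (Or.inl rfl)

-- ===== VERDICT (by name: the statement is the Claim_ definition above) =====
theorem maxDepthAfterSplit_spec : Claim_equal_maxDepthAfterSplit := by
  intro seq _
  unfold Spec_maxDepthAfterSplit maxDepthAfterSplit maxDepthAfterSplit_alt
  have := maxDepthAfterSplit_loop seq.toList 0 0 [] (Or.inl rfl)
  simpa using this
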